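-- pv_equiv track=rewrite | github.com/kamuma03/ExtractMark | extractmark/evaluators/unit_tests.py | _check_no_repetition
-- ===== SOURCE A (Python) =====
-- def _check_no_repetition(text: str, n: int = 5, max_repeats: int = 3) -> bool:
--     """Check that no n-gram is repeated more than max_repeats times."""
--     words = text.split()
--     if len(words) < n:
--         return True
--     ngram_counts: dict[str, int] = {}
--     for i in range(len(words) - n + 1):
--         ngram = " ".join(words[i : i + n])
--         ngram_counts[ngram] = ngram_counts.get(ngram, 0) + 1
--         if ngram_counts[ngram] > max_repeats:
--             return False
--     return True
-- ===== SOURCE B (Python) =====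
-- def _boundary(seen, gram, upper):
--     """First index in sorted seen whose element is > gram (upper) / >= gram (not upper)."""
--     lo, hi = 0, len(seen)
--     while lo < hi:
--         mid = (lo + hi) // 2
--         if seen[mid] < gram or (upper and seen[mid] == gram):
--             lo = mid + 1
--         else:
--             hi = mid
--     return lo
--
--
-- def _check_no_repetition(text: str, n: int = 5, max_repeats: int = 3) -> bool:
--     """Check that no n-gram is repeated more than max_repeats times."""
--     words = text.split()
--     if len(words) < n:
--         return True
--     seen = []  # every n-gram met so far, kept sorted
--     for i in range(len(words) - n + 1):
--         gram = " ".join(words[i : i + n])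
--         hi = _boundary(seen, gram, True)
--         if hi - _boundary(seen, gram, False) >= max_repeats:
--             return False
--         seen.insert(hi, gram)
--     return True
-- ===== Notes on version B (the rewrite author's own statement) =====
-- stated objective: alternative
-- what changed: Replaces A's hash-dict counting with an incrementally maintained sorted list of the n-grams seen so far: a hand-written binary search yields the two boundaries of a gram's run (their difference is its multiplicity) and the gram is inserted at the upper boundary, so no dictionary is ever built.
import Mathlib
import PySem

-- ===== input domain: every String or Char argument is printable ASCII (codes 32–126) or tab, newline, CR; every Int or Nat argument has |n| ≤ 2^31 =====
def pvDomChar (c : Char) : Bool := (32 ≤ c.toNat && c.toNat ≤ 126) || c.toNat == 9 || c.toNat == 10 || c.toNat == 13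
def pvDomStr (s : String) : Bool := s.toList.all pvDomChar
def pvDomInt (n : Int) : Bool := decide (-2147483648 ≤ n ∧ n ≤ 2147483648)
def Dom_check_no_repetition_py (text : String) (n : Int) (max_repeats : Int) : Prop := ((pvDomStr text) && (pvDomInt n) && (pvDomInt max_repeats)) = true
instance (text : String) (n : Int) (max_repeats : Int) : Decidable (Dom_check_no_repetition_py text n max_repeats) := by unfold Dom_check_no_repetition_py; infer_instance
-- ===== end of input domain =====

-- B replaces A's hash-dict counting scan by an incrementally maintained sorted list: each n-gram is located with binary search, its multiplicity read off the two boundaries, and inserted in order (alternative data structure, same return value).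


-- ===== PORT A =====
-- the n-gram starting at index i: " ".join(words[i : i + n])
def pvGram (words : List String) (n i : Int) : String :=
  PySem.Str.join " " (PySem.List.slice words (some i) (some (i + n)))

-- A's for-loop: dict of counts, early return False when a count exceeds max_repeats
def pvALoop (words : List String) (n max_repeats : Int) (idxs : List Int)
    (d : PySem.Dict String Int) : Bool :=
  match idxs with
  | [] => true
  | i :: rest =>
    let ngram := pvGram words n i
    let d' := d.insert ngram (d.getD ngram 0 + 1)
    if d'.getD ngram 0 > max_repeats then false
    else pvALoop words n max_repeats rest d'

def check_no_repetition_py (text : String) (n : Int) (max_repeats : Int) : Bool :=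
  let words := PySem.Str.split₀ text
  if (words.length : Int) < n then true
  else pvALoop words n max_repeats
    (PySem.List.pyRange 0 ((words.length : Int) - n + 1) 1) PySem.Dict.empty

-- ===== PORT B =====
-- Source B's _boundary: binary search for the first index whose element is > gram (upper) / ≥ gram (not upper).
-- seen.getD mid "" ports Python's seen[mid]: every call keeps hi ≤ seen.length, so mid is in range.
def pvBoundary (seen : List String) (gram : String) (upper : Bool) (lo hi : Nat) : Nat :=
  if h : lo < hi then
    let mid := (lo + hi) / 2
    let y := seen.getD mid ""
    if y < gram ∨ (upper = true ∧ y = gram) then pvBoundary seen gram upper (mid + 1) hi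
    else pvBoundary seen gram upper lo mid
  else lo
termination_by hi - lo
decreasing_by all_goals omega

-- B's for-loop: sorted list of the n-grams met so far; boundary difference = multiplicity; insert at the upper boundary
def pvBLoop (words : List String) (n max_repeats : Int) (idxs : List Int)
    (seen : List String) : Bool :=
  match idxs with
  | [] => true
  | i :: rest =>
    let gram := pvGram words n i
    let hi := pvBoundary seen gram true 0 seen.length
    if (hi : Int) - (pvBoundary seen gram false 0 seen.length : Int) ≥ max_repeats then false
    else pvBLoop words n max_repeats rest (PySem.List.insert seen (hi : Int) gram)

def check_no_repetition_py_alt (text : String) (n : Int) (max_repeats : Int) : Bool :=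
  let words := PySem.Str.split₀ text
  if (words.length : Int) < n then true
  else pvBLoop words n max_repeats
    (PySem.List.pyRange 0 ((words.length : Int) - n + 1) 1) []

-- ===== PRECONDITION & SPEC =====
def Spec_check_no_repetition_py (text : String) (n : Int) (max_repeats : Int) (out : Bool) : Prop := out = check_no_repetition_py_alt text n max_repeats
instance (text : String) (n : Int) (max_repeats : Int) (out : Bool) : Decidable (Spec_check_no_repetition_py text n max_repeats out) := by unfold Spec_check_no_repetition_py; infer_instance

-- ===== CLAIM (what is proved, stated in full; the proofs are below) =====
def Claim_equal_check_no_repetition_py : Prop := ∀ (text : String) (n : Int) (max_repeats : Int), Dom_check_no_repetition_py text n max_repeats → Spec_check_no_repetition_py text n max_repeats (check_no_repetition_py text n max_repeats)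

-- ===== LEMMAS AND PROOFS =====

-- A's loop succeeds iff every gram's carried-in + remaining count stays within max_repeats
theorem pvALoop_eq_true_iff (words : List String) (n max_repeats : Int) :
    ∀ (idxs : List Int) (d : PySem.Dict String Int),
      (pvALoop words n max_repeats idxs d = true ↔
        ∀ g ∈ idxs.map (pvGram words n),
          d.getD g 0 + ((idxs.map (pvGram words n)).count g : Int) ≤ max_repeats) := by
  intro idxs
  induction idxs with
  | nil => intro d; simp [pvALoop]
  | cons i rest ih =>
    intro d
    simp only [pvALoop, PySem.Dict.getD_insert_self, List.map_cons]
    split_ifs with hc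
    · constructor
      · intro h; cases h
      · intro h
        exfalso
        have h0 := h (pvGram words n i) (by simp)
        have hnn : (0:Int) ≤ ((rest.map (pvGram words n)).count (pvGram words n i) : Int) := by
          positivity
        simp at h0
        omega
    · rw [ih]
      constructor
      · intro h g hg
        by_cases he : g = pvGram words n i
        · subst he
          by_cases hin : pvGram words n i ∈ rest.map (pvGram words n)
          · have := h _ hin
            rw [PySem.Dict.getD_insert_self] at this
            simp
            omega
          · simp [List.count_eq_zero_of_not_mem hin]
            omega
        · have hg' : g ∈ rest.map (pvGram words n) := by
            rcases List.mem_cons.mp hg with h1 | h1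
            · exact absurd h1 he
            · exact h1
          have := h g hg'
          rw [PySem.Dict.getD_insert_of_ne _ _ _ he] at this
          have he' : ¬pvGram words n i = g := fun hh => he hh.symm
          rw [List.count_cons]
          simp only [beq_iff_eq, he', if_false]
          push_cast
          omega
      · intro h g hg
        by_cases he : g = pvGram words n i
        · subst he
          have := h _ (List.mem_cons_self)
          rw [PySem.Dict.getD_insert_self]
          simp at this
          omega
        · have := h g (List.mem_cons_of_mem _ hg)
          rw [PySem.Dict.getD_insert_of_ne _ _ _ he]
          have he' : ¬pvGram words n i = g := fun hh => he hh.symm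
          rw [List.count_cons] at this
          simp only [beq_iff_eq, he', if_false] at this
          push_cast at this ⊢
          omega

-- binary-search boundary: below the result the predicate holds, from it on it fails
theorem pvBoundary_spec (seen : List String) (gram : String) (upper : Bool) (P : String → Prop)
    (hiff : ∀ y, (y < gram ∨ (upper = true ∧ y = gram)) ↔ P y)
    (hdown : ∀ y y', y' ≤ y → P y → P y')
    (hs : seen.Pairwise (· ≤ ·)) :
    ∀ (d lo hi : Nat), hi - lo ≤ d → lo ≤ hi → hi ≤ seen.length →
    (∀ k, k < lo → P (seen.getD k "")) →
    (∀ k, hi ≤ k → k < seen.length → ¬P (seen.getD k "")) →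
    (pvBoundary seen gram upper lo hi ≤ seen.length ∧
     ∀ k, k < seen.length → (P (seen.getD k "") ↔ k < pvBoundary seen gram upper lo hi)) := by
  have hmono : ∀ (a b : Nat), a ≤ b → (hb : b < seen.length) →
      seen.getD a "" ≤ seen.getD b "" := by
    intro a b hab hb
    rcases Nat.eq_or_lt_of_le hab with rfl | hab'
    · exact le_refl _
    · rw [List.getD_eq_getElem _ _ (lt_trans hab' hb), List.getD_eq_getElem _ _ hb]
      exact List.pairwise_iff_getElem.mp hs a b _ _ hab'
  intro d
  induction d with
  | zero =>
    intro lo hi hd hle hlen hpre hpost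
    have heq : lo = hi := by omega
    rw [pvBoundary, dif_neg (by omega)]
    refine ⟨by omega, ?_⟩
    intro k hk
    constructor
    · intro hP
      by_contra hk'
      exact hpost k (by omega) hk hP
    · intro hk'; exact hpre k hk'
  | succ d ih =>
    intro lo hi hd hle hlen hpre hpost
    by_cases hlt : lo < hi
    · rw [pvBoundary, dif_pos hlt]
      have hmidlt : (lo + hi) / 2 < seen.length := by omega
      by_cases hc : seen.getD ((lo + hi) / 2) "" < gram ∨
          (upper = true ∧ seen.getD ((lo + hi) / 2) "" = gram)
      · rw [if_pos hc]
        have hPmid : P (seen.getD ((lo + hi) / 2) "") := (hiff _).mp hc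
        exact ih ((lo + hi) / 2 + 1) hi (by omega) (by omega) hlen
          (fun k hk => by
            by_cases hklo : k < lo
            · exact hpre k hklo
            · exact hdown _ _ (hmono k ((lo + hi) / 2) (by omega) hmidlt) hPmid)
          hpost
      · rw [if_neg hc]
        have hPmid : ¬P (seen.getD ((lo + hi) / 2) "") := fun hP => hc ((hiff _).mpr hP)
        exact ih lo ((lo + hi) / 2) (by omega) (by omega) (by omega)
          hpre
          (fun k hk hklen hP => by
            by_cases hkhi : hi ≤ k
            · exact hpost k hkhi hklen hP
            · exact hPmid (hdown _ _ (hmono ((lo + hi) / 2) k (by omega) hklen) hP))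
    · rw [pvBoundary, dif_neg hlt]
      refine ⟨by omega, ?_⟩
      intro k hk
      constructor
      · intro hP
        by_contra hk'
        exact hpost k (by omega) hk hP
      · intro hk'; exact hpre k hk'

theorem pvB_charL (seen : List String) (gram : String) (hs : seen.Pairwise (· ≤ ·)) :
    pvBoundary seen gram false 0 seen.length ≤ seen.length ∧
    ∀ k, k < seen.length →
      (seen.getD k "" < gram ↔ k < pvBoundary seen gram false 0 seen.length) :=
  pvBoundary_spec seen gram false (· < gram) (by simp)
    (fun y y' h hy => lt_of_le_of_lt h hy) hs seen.length 0 seen.length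
    (by omega) (by omega) (le_refl _) (by omega) (by omega)

theorem pvB_charR (seen : List String) (gram : String) (hs : seen.Pairwise (· ≤ ·)) :
    pvBoundary seen gram true 0 seen.length ≤ seen.length ∧
    ∀ k, k < seen.length →
      (seen.getD k "" ≤ gram ↔ k < pvBoundary seen gram true 0 seen.length) :=
  pvBoundary_spec seen gram true (· ≤ gram)
    (by intro y; simp [le_iff_lt_or_eq])
    (fun y y' h hy => le_trans h hy) hs seen.length 0 seen.length
    (by omega) (by omega) (le_refl _) (by omega) (by omega)

theorem pvB_le (seen : List String) (gram : String) (hs : seen.Pairwise (· ≤ ·)) :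
    pvBoundary seen gram false 0 seen.length ≤ pvBoundary seen gram true 0 seen.length := by
  by_contra hlr
  push Not at hlr
  have hr := pvB_charR seen gram hs
  have hl := pvB_charL seen gram hs
  have hrlen : pvBoundary seen gram true 0 seen.length < seen.length := by
    have := hl.1; omega
  have h1 := (hl.2 _ hrlen).mpr hlr
  exact absurd ((hr.2 _ hrlen).mp (le_of_lt h1)) (lt_irrefl _)

theorem pvB_count (seen : List String) (gram : String) (hs : seen.Pairwise (· ≤ ·)) :
    seen.count gram + pvBoundary seen gram false 0 seen.length
      = pvBoundary seen gram true 0 seen.length := by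
  have hl := pvB_charL seen gram hs
  have hr := pvB_charR seen gram hs
  have hlr := pvB_le seen gram hs
  set l := pvBoundary seen gram false 0 seen.length with hldef
  set r := pvBoundary seen gram true 0 seen.length with hrdef
  have hrlen : r ≤ seen.length := hr.1
  have hcdrop : (seen.drop r).count gram = 0 := by
    rw [List.count_eq_zero]
    intro hmem
    obtain ⟨j, hj, hjeq⟩ := List.mem_iff_getElem.mp hmem
    have hjl : r + j < seen.length := by
      have := seen.length_drop (i := r); omega
    rw [List.getElem_drop] at hjeq
    have hle : seen.getD (r + j) "" ≤ gram := by
      rw [List.getD_eq_getElem _ _ hjl, hjeq]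
    have := (hr.2 _ hjl).mp hle
    omega
  have hctakel : (seen.take l).count gram = 0 := by
    rw [List.count_eq_zero]
    intro hmem
    obtain ⟨j, hj, hjeq⟩ := List.mem_iff_getElem.mp hmem
    have hjlen : j < seen.length := by
      have := seen.length_take (i := l); omega
    have hjl : j < l := by
      have := seen.length_take (i := l); omega
    rw [List.getElem_take] at hjeq
    have hlt : seen.getD j "" < gram := (hl.2 _ hjlen).mpr hjl
    rw [List.getD_eq_getElem _ _ hjlen, hjeq] at hlt
    exact lt_irrefl _ hlt
  have hcmid : ((seen.drop l).take (r - l)).count gram = r - l := by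
    have hall : ∀ b ∈ (seen.drop l).take (r - l), gram = b := by
      intro b hb
      obtain ⟨j, hj, hjeq⟩ := List.mem_iff_getElem.mp hb
      have hjlen : j < r - l := by
        have h1 := ((seen.drop l).length_take (i := r - l)); omega
      have hidx : l + j < seen.length := by omega
      rw [List.getElem_take, List.getElem_drop] at hjeq
      have h1 : seen.getD (l + j) "" ≤ gram := (hr.2 _ hidx).mpr (by omega)
      have h2 : ¬ seen.getD (l + j) "" < gram := fun hlt => by
        have := (hl.2 _ hidx).mp hlt; omega
      have heq : seen.getD (l + j) "" = gram := le_antisymm h1 (not_lt.mp h2)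
      rw [List.getD_eq_getElem _ _ hidx, hjeq] at heq
      exact heq.symm
    rw [List.count_eq_length.mpr hall, List.length_take, List.length_drop]
    omega
  have hsplit : seen.take r = seen.take l ++ (seen.drop l).take (r - l) := by
    have h1 : l + (r - l) = r := by omega
    rw [← h1, List.take_add]
    simp
  have : seen.count gram = (seen.take r).count gram + (seen.drop r).count gram := by
    conv_lhs => rw [← List.take_append_drop r seen]
    rw [List.count_append]
  rw [this, hsplit, List.count_append, hctakel, hcmid, hcdrop]
  omega

theorem pvInsert_natCast (xs : List String) (r : Nat) (v : String) (h : r ≤ xs.length) :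
    PySem.List.insert xs (r:Int) v = xs.take r ++ v :: xs.drop r := by
  simp only [PySem.List.insert, PySem.List.sliceIndices]
  norm_num
  rw [if_neg (by omega), min_eq_left (by omega)]
  simp

theorem pvMemTake_le (seen : List String) (gram : String) (hs : seen.Pairwise (· ≤ ·)) :
    ∀ x ∈ seen.take (pvBoundary seen gram true 0 seen.length), x ≤ gram := by
  have hr := pvB_charR seen gram hs
  intro x hx
  obtain ⟨j, hj, hjeq⟩ := List.mem_iff_getElem.mp hx
  have hjlen : j < seen.length := by
    have := seen.length_take (i := pvBoundary seen gram true 0 seen.length); omega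
  have hjr : j < pvBoundary seen gram true 0 seen.length := by
    have := seen.length_take (i := pvBoundary seen gram true 0 seen.length); omega
  rw [List.getElem_take] at hjeq
  have := (hr.2 _ hjlen).mpr hjr
  rw [List.getD_eq_getElem _ _ hjlen, hjeq] at this
  exact this

theorem pvMemDrop_ge (seen : List String) (gram : String) (hs : seen.Pairwise (· ≤ ·)) :
    ∀ y ∈ seen.drop (pvBoundary seen gram true 0 seen.length), gram ≤ y := by
  have hr := pvB_charR seen gram hs
  intro y hy
  obtain ⟨j, hj, hjeq⟩ := List.mem_iff_getElem.mp hy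
  have hjlen : pvBoundary seen gram true 0 seen.length + j < seen.length := by
    have := seen.length_drop (i := pvBoundary seen gram true 0 seen.length); omega
  rw [List.getElem_drop] at hjeq
  have hnle : ¬ seen.getD (pvBoundary seen gram true 0 seen.length + j) "" ≤ gram := by
    intro hle
    have := (hr.2 _ hjlen).mp hle
    omega
  rw [List.getD_eq_getElem _ _ hjlen, hjeq] at hnle
  exact le_of_lt (not_le.mp hnle)

theorem pvInsert_sorted (seen : List String) (gram : String) (hs : seen.Pairwise (· ≤ ·)) :
    (seen.take (pvBoundary seen gram true 0 seen.length) ++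
      gram :: seen.drop (pvBoundary seen gram true 0 seen.length)).Pairwise (· ≤ ·) := by
  rw [List.pairwise_append]
  refine ⟨hs.sublist (List.take_sublist _ _), ?_, ?_⟩
  · rw [List.pairwise_cons]
    exact ⟨pvMemDrop_ge seen gram hs, hs.sublist (List.drop_sublist _ _)⟩
  · intro x hx y hy
    rcases List.mem_cons.mp hy with h1 | hy'
    · rw [h1]; exact pvMemTake_le seen gram hs x hx
    · exact le_trans (pvMemTake_le seen gram hs x hx) (pvMemDrop_ge seen gram hs y hy')

theorem pvInsert_perm (seen : List String) (gram : String) (r : Nat) :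
    (seen.take r ++ gram :: seen.drop r).Perm (gram :: seen) := by
  have h := List.perm_middle (a := gram) (l₁ := seen.take r) (l₂ := seen.drop r)
  rwa [List.take_append_drop] at h

-- B's loop succeeds iff every gram's carried-in + remaining count stays within max_repeats
theorem pvBLoop_eq_true_iff (words : List String) (n max_repeats : Int) :
    ∀ (idxs : List Int) (seen : List String), seen.Pairwise (· ≤ ·) →
      (pvBLoop words n max_repeats idxs seen = true ↔
        ∀ g ∈ idxs.map (pvGram words n),
          (seen.count g : Int) + ((idxs.map (pvGram words n)).count g : Int) ≤ max_repeats) := by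
  intro idxs
  induction idxs with
  | nil => intro seen _; simp [pvBLoop]
  | cons i rest ih =>
    intro seen hsorted
    have hcnt := pvB_count seen (pvGram words n i) hsorted
    have hrlen := (pvB_charR seen (pvGram words n i) hsorted).1
    simp only [pvBLoop, List.map_cons]
    split_ifs with hcond
    · constructor
      · intro h; cases h
      · intro h
        exfalso
        have h0 := h (pvGram words n i) (by simp)
        simp at h0
        have : (0:Int) ≤ ((rest.map (pvGram words n)).count (pvGram words n i) : Int) := by
          positivity
        omega
    · rw [pvInsert_natCast seen _ _ hrlen,
        ih _ (pvInsert_sorted seen (pvGram words n i) hsorted)]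
      have hcount : ∀ x : String,
          ((seen.take (pvBoundary seen (pvGram words n i) true 0 seen.length) ++
            pvGram words n i ::
              seen.drop (pvBoundary seen (pvGram words n i) true 0 seen.length)).count x)
            = ((pvGram words n i :: seen).count x) :=
        fun x => (pvInsert_perm seen (pvGram words n i) _).count_eq x
      constructor
      · intro h g hg
        by_cases he : g = pvGram words n i
        · subst he
          by_cases hin : pvGram words n i ∈ rest.map (pvGram words n)
          · have hthis := h _ hin
            rw [hcount, List.count_cons_self] at hthis
            simp
            omega
          · simp [List.count_eq_zero_of_not_mem hin]
            omega
        · have hg' : g ∈ rest.map (pvGram words n) := by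
            rcases List.mem_cons.mp hg with h1 | h1
            · exact absurd h1 he
            · exact h1
          have hthis := h g hg'
          have he' : ¬pvGram words n i = g := fun hh => he hh.symm
          rw [hcount, List.count_cons, if_neg (by simpa [beq_iff_eq] using he')] at hthis
          rw [List.count_cons]
          simp only [beq_iff_eq, he', if_false]
          push_cast
          omega
      · intro h g hg
        by_cases he : g = pvGram words n i
        · subst he
          have hthis := h _ (List.mem_cons_self)
          rw [hcount, List.count_cons_self]
          simp at hthis
          push_cast at hthis ⊢
          omega
        · have hthis := h g (List.mem_cons_of_mem _ hg)
          have he' : ¬pvGram words n i = g := fun hh => he hh.symm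
          rw [List.count_cons] at hthis
          simp only [beq_iff_eq, he', if_false] at hthis
          rw [hcount, List.count_cons, if_neg (by simpa [beq_iff_eq] using he')]
          push_cast at hthis ⊢
          omega

-- ===== VERDICT (by name: the statement is the Claim_ definition above) =====
theorem check_no_repetition_py_spec : Claim_equal_check_no_repetition_py := by
  intro text n max_repeats _
  unfold Spec_check_no_repetition_py check_no_repetition_py check_no_repetition_py_alt
  by_cases hlt : ((PySem.Str.split₀ text).length : Int) < n
  · simp only [hlt, if_true]
  · simp only [hlt, if_false]
    rw [Bool.eq_iff_iff]
    rw [pvALoop_eq_true_iff (PySem.Str.split₀ text) n max_repeats _ PySem.Dict.empty]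
    rw [pvBLoop_eq_true_iff (PySem.Str.split₀ text) n max_repeats _ [] (by simp)]
    constructor
    · intro h g hg
      have := h g hg
      simpa [PySem.Dict.getD_empty] using this
    · intro h g hg
      have := h g hg
      simpa [PySem.Dict.getD_empty] using this
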